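-- pv_equiv track=rewrite | github.com/Lucasgarciamdz/entrenai-tesis-um | app/procesamiento_bytewax/utils.py | convertir_a_markdown
-- ===== SOURCE A (Python) =====
-- def convertir_a_markdown(texto: str) -> str:
--     """
--     Convierte un texto plano a formato Markdown.
--
--     Args:
--         texto: Texto a convertir
--
--     Returns:
--         Texto en formato Markdown
--     """
--     if not texto:
--         return ""
--
--     # Dividir en líneas y párrafos
--     lineas = texto.split("\n")
--     parrafos = []
--     parrafo_actual = []
--
--     for linea in lineas:
--         if linea.strip():
--             parrafo_actual.append(linea)
--         elif parrafo_actual: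
--             parrafos.append(" ".join(parrafo_actual))
--             parrafo_actual = []
--
--     if parrafo_actual:
--         parrafos.append(" ".join(parrafo_actual))
--
--     # Intentar identificar títulos y subtítulos
--     resultado = []
--     for i, parrafo in enumerate(parrafos):
--         parrafo = parrafo.strip()
--
--         # Si es un párrafo corto y termina con :, podría ser un título
--         if len(parrafo) < 50 and parrafo.endswith(":"):
--             resultado.append(f"## {parrafo[:-1]}\n")
--         # Si es un párrafo muy corto y es uno de los primeros, podría ser título
--         elif len(parrafo) < 30 and i < 2:
--             resultado.append(f"# {parrafo}\n")
--         # Párrafo normal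
--         else:
--             resultado.append(f"{parrafo}\n\n")
--
--     return "\n".join(resultado)
-- ===== SOURCE B (Python) =====
-- def convertir_a_markdown(texto: str) -> str:
--     """Convierte un texto plano a formato Markdown (reimplementacion)."""
--     if not texto:
--         return ""
--
--     # Build the paragraph list back-to-front: walk the lines in reverse and
--     # prepend each non-blank line, merging it into the paragraph in front
--     # whenever the line that follows it was non-blank too.  No flush state
--     # machine and no post-loop flush are needed.
--     parrafos = []
--     sigue = False  # was the line after the current one non-blank?
--     for linea in reversed(texto.split("\n")):
--         if linea.strip():
--             if sigue:
--                 parrafos[0] = linea + " " + parrafos[0]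
--             else:
--                 parrafos.insert(0, linea)
--             sigue = True
--         else:
--             sigue = False
--
--     return "\n".join(
--         _formato(i, parrafo.strip()) for i, parrafo in enumerate(parrafos)
--     )
--
--
-- def _formato(i: int, parrafo: str) -> str:
--     if len(parrafo) < 50 and parrafo.endswith(":"):
--         return "## " + parrafo[:-1] + "\n"
--     if len(parrafo) < 30 and i < 2:
--         return "# " + parrafo + "\n"
--     return parrafo + "\n\n"
-- ===== Notes on version B (the rewrite author's own statement) =====
-- stated objective: alternative
-- what changed: Replaces A's accumulate-and-flush paragraph state machine (with a post-loop flush) by a reversed single pass that builds the paragraph list back-to-front, merging each non-blank line into the front paragraph, and renders the paragraphs with a classification helper inside a comprehension instead of an append loop.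
import Mathlib
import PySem

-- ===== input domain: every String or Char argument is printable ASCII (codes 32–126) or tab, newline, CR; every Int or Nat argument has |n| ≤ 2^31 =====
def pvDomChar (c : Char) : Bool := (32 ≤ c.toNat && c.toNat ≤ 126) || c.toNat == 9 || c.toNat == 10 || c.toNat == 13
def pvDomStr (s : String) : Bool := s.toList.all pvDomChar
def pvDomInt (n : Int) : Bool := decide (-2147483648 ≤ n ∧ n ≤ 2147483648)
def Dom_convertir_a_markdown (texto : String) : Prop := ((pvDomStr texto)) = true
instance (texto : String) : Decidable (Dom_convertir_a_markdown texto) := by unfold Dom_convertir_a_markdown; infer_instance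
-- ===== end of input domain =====

-- B replaces A's accumulate-and-flush paragraph state machine by a reversed pass that
-- builds the paragraph list back-to-front, and renders via a helper + map (objective: alternative).

-- ===== PORT A =====
def convertir_a_markdown (texto : String) : String :=
  if texto = "" then ""
  else
    let lineas := (PySem.Str.split? texto "\n").getD []   -- sep ≠ "", so split? is always some
    let st := lineas.foldl (fun (st : List String × List String) linea =>
        if PySem.Str.strip linea ≠ "" then (st.1, st.2 ++ [linea])
        else if st.2 ≠ [] then (st.1 ++ [PySem.Str.join " " st.2], [])
        else st) ([], [])
    let parrafos := if st.2 ≠ [] then st.1 ++ [PySem.Str.join " " st.2] else st.1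
    let resultado := (PySem.List.enumerate parrafos).foldl
      (fun (resultado : List String) ip =>
        let parrafo := PySem.Str.strip ip.2
        if PySem.Str.len parrafo < 50 ∧ PySem.Str.endswith parrafo ":" = true then
          resultado ++ ["## " ++ PySem.Str.slice parrafo none (some (-1)) ++ "\n"]
        else if PySem.Str.len parrafo < 30 ∧ ip.1 < 2 then
          resultado ++ ["# " ++ parrafo ++ "\n"]
        else resultado ++ [parrafo ++ "\n\n"]) []
    PySem.Str.join "\n" resultado

-- ===== PORT B =====
def pvFormato (i : Int) (parrafo : String) : String :=
  if PySem.Str.len parrafo < 50 ∧ PySem.Str.endswith parrafo ":" = true then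
    "## " ++ PySem.Str.slice parrafo none (some (-1)) ++ "\n"
  else if PySem.Str.len parrafo < 30 ∧ i < 2 then
    "# " ++ parrafo ++ "\n"
  else parrafo ++ "\n\n"

def convertir_a_markdown_alt (texto : String) : String :=
  if texto = "" then ""
  else
    let lineas := (PySem.Str.split? texto "\n").getD []
    -- Source B reads parrafos[0] only when sigue is true (the list is then non-empty);
    -- headD "" is that same read made total, the default is never returned.
    let st := lineas.reverse.foldl (fun (st : List String × Bool) linea =>
        if PySem.Str.strip linea ≠ "" then
          ((if st.2 then (linea ++ " " ++ st.1.headD "") :: st.1.tail else linea :: st.1), true)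
        else (st.1, false)) ([], false)
    PySem.Str.join "\n"
      ((PySem.List.enumerate st.1).map (fun ip => pvFormato ip.1 (PySem.Str.strip ip.2)))

-- ===== PRECONDITION & SPEC =====
def Spec_convertir_a_markdown (texto : String) (out : String) : Prop := out = convertir_a_markdown_alt texto
instance (texto : String) (out : String) : Decidable (Spec_convertir_a_markdown texto out) := by unfold Spec_convertir_a_markdown; infer_instance

-- ===== CLAIM (what is proved, stated in full; the proofs are below) =====
def Claim_equal_convertir_a_markdown : Prop := ∀ (texto : String), Dom_convertir_a_markdown texto → Spec_convertir_a_markdown texto (convertir_a_markdown texto)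

-- ===== LEMMAS AND PROOFS =====

-- A's paragraph-building step (the lambda of A's first loop, named for the proofs)
def pvStepA (st : List String × List String) (linea : String) : List String × List String :=
  if PySem.Str.strip linea ≠ "" then (st.1, st.2 ++ [linea])
  else if st.2 ≠ [] then (st.1 ++ [PySem.Str.join " " st.2], [])
  else st

-- B's paragraph-building step (the lambda of B's reversed loop, named for the proofs)
def pvStepB (st : List String × Bool) (linea : String) : List String × Bool :=
  if PySem.Str.strip linea ≠ "" then
    ((if st.2 then (linea ++ " " ++ st.1.headD "") :: st.1.tail else linea :: st.1), true)
  else (st.1, false)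

-- "pending paragraph" merged into B's back-to-front result
def pvG : Option String → List String × Bool → List String
  | none, st => st.1
  | some c, (ps, true) => (c ++ " " ++ ps.headD "") :: ps.tail
  | some c, (ps, false) => c :: ps

def pvPend (cur : List String) : Option String :=
  if cur = [] then none else some (PySem.Str.join " " cur)

theorem joinCh_append_singleton (sep y : List Char) :
    ∀ (parts : List (List Char)), parts ≠ [] →
    PySem.Chars.join sep (parts ++ [y]) = PySem.Chars.join sep parts ++ sep ++ y
  | [], h => by simp at h
  | [p], _ => by
      rw [List.cons_append, List.nil_append, PySem.Chars.join_cons_cons,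
        PySem.Chars.join_singleton, PySem.Chars.join_singleton]
  | p :: q :: qs, _ => by
      rw [List.cons_append, List.cons_append, PySem.Chars.join_cons_cons,
        ← List.cons_append, joinCh_append_singleton sep y (q :: qs) (by simp),
        PySem.Chars.join_cons_cons]
      simp [List.append_assoc]

theorem joinS_append_singleton (cur : List String) (l : String) (h : cur ≠ []) :
    PySem.Str.join " " (cur ++ [l]) = PySem.Str.join " " cur ++ " " ++ l := by
  rw [← String.toList_inj]
  simp only [PySem.Str.toList_join, String.toList_append, List.map_append, List.map_cons,
    List.map_nil]
  exact joinCh_append_singleton _ _ _ (by simpa using h)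

theorem joinS_singleton (l : String) : PySem.Str.join " " [l] = l := by
  rw [← String.toList_inj]
  simp [PySem.Str.toList_join, PySem.Chars.join_singleton]

-- the heart: A's flush-at-the-end fold equals B's back-to-front foldr, pending part merged by pvG
theorem pvParas_eq : ∀ (ls paras cur : List String),
    (let st := ls.foldl pvStepA (paras, cur)
     if st.2 ≠ [] then st.1 ++ [PySem.Str.join " " st.2] else st.1)
    = paras ++ pvG (pvPend cur) (ls.foldr (fun x y => pvStepB y x) ([], false)) := by
  intro ls
  induction ls with
  | nil =>
    intro paras cur
    cases cur with
    | nil => simp [pvG, pvPend]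
    | cons c cs => simp [pvG, pvPend]
  | cons l ls ih =>
    intro paras cur
    simp only [List.foldl_cons, List.foldr_cons]
    by_cases hb : PySem.Str.strip l = ""
    · -- blank line
      rw [show pvStepA (paras, cur) l =
          (if cur ≠ [] then (paras ++ [PySem.Str.join " " cur], []) else (paras, cur)) by
        simp [pvStepA, hb]]
      rw [show pvStepB (ls.foldr (fun x y => pvStepB y x) ([], false)) l =
          ((ls.foldr (fun x y => pvStepB y x) ([], false)).1, false) by
        simp [pvStepB, hb]]
      by_cases hc : cur = []
      · subst hc
        simp only [ne_eq, not_true_eq_false, reduceIte]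
        rw [ih paras []]
        simp [pvG, pvPend]
      · simp only [ne_eq, hc, not_false_eq_true, if_pos]
        rw [ih (paras ++ [PySem.Str.join " " cur]) []]
        simp [pvG, pvPend, hc]
    · -- non-blank line
      rw [show pvStepA (paras, cur) l = (paras, cur ++ [l]) by simp [pvStepA, hb]]
      rw [ih paras (cur ++ [l])]
      congr 1
      set F := ls.foldr (fun x y => pvStepB y x) ([], false) with hF
      rw [show pvStepB F l =
          ((if F.2 then (l ++ " " ++ F.1.headD "") :: F.1.tail else l :: F.1), true) by
        simp [pvStepB, hb]]
      obtain ⟨ps, sigue⟩ := F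
      by_cases hc : cur = []
      · subst hc
        cases sigue <;> simp [pvG, pvPend, joinS_singleton]
      · rw [show pvPend (cur ++ [l]) = some (PySem.Str.join " " (cur ++ [l])) by
          simp [pvPend]]
        rw [show pvPend cur = some (PySem.Str.join " " cur) by simp [pvPend, hc]]
        rw [joinS_append_singleton cur l hc]
        cases sigue <;> simp [pvG, String.append_assoc]

-- A's classification loop is the map with pvFormato
theorem pvClasif_eq (parrafos : List String) :
    (PySem.List.enumerate parrafos).foldl
      (fun (resultado : List String) ip =>
        let parrafo := PySem.Str.strip ip.2
        if PySem.Str.len parrafo < 50 ∧ PySem.Str.endswith parrafo ":" = true then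
          resultado ++ ["## " ++ PySem.Str.slice parrafo none (some (-1)) ++ "\n"]
        else if PySem.Str.len parrafo < 30 ∧ ip.1 < 2 then
          resultado ++ ["# " ++ parrafo ++ "\n"]
        else resultado ++ [parrafo ++ "\n\n"]) []
    = (PySem.List.enumerate parrafos).map (fun ip => pvFormato ip.1 (PySem.Str.strip ip.2)) := by
  have h : (fun (resultado : List String) (ip : Int × String) =>
        let parrafo := PySem.Str.strip ip.2
        if PySem.Str.len parrafo < 50 ∧ PySem.Str.endswith parrafo ":" = true then
          resultado ++ ["## " ++ PySem.Str.slice parrafo none (some (-1)) ++ "\n"]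
        else if PySem.Str.len parrafo < 30 ∧ ip.1 < 2 then
          resultado ++ ["# " ++ parrafo ++ "\n"]
        else resultado ++ [parrafo ++ "\n\n"])
      = (fun resultado ip => resultado ++ [pvFormato ip.1 (PySem.Str.strip ip.2)]) := by
    funext resultado ip
    simp only [pvFormato]
    split_ifs <;> rfl
  rw [h, PySem.List.foldl_append_singleton_eq_map]
  simp

-- ===== VERDICT (by name: the statement is the Claim_ definition above) =====
theorem convertir_a_markdown_spec : Claim_equal_convertir_a_markdown := by
  unfold Claim_equal_convertir_a_markdown Spec_convertir_a_markdown
  intro texto _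
  unfold convertir_a_markdown convertir_a_markdown_alt
  by_cases h : texto = ""
  · simp [h]
  · simp only [h, reduceIte]
    rw [List.foldl_reverse]
    rw [show ((PySem.Str.split? texto "\n").getD []).foldl (fun (st : List String × List String) linea =>
        if PySem.Str.strip linea ≠ "" then (st.1, st.2 ++ [linea])
        else if st.2 ≠ [] then (st.1 ++ [PySem.Str.join " " st.2], [])
        else st) ([], []) =
      ((PySem.Str.split? texto "\n").getD []).foldl pvStepA ([], []) from rfl]
    rw [show ((PySem.Str.split? texto "\n").getD []).foldr (fun x (y : List String × Bool) =>
        (fun (st : List String × Bool) linea =>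
          if PySem.Str.strip linea ≠ "" then
            ((if st.2 then (linea ++ " " ++ st.1.headD "") :: st.1.tail else linea :: st.1), true)
          else (st.1, false)) y x) ([], false) =
      ((PySem.Str.split? texto "\n").getD []).foldr (fun x y => pvStepB y x) ([], false) from rfl]
    rw [pvClasif_eq]
    have := pvParas_eq ((PySem.Str.split? texto "\n").getD []) [] []
    simp only [List.nil_append] at this
    rw [this]
    rfl
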